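-- pv_equiv track=rewrite | github.com/paintingburritos/AOC-2021 | Day05/Day05.py | lineCoord
-- ===== SOURCE A (Python) =====
-- def lineCoord(coord1,coord2):
--   points = []
--   if coord1[0] == coord2[0]:
--     for i in range(abs(coord2[1]-coord1[1])+1):
--       if coord1[1] > coord2[1]:
--         points.append((coord1[0],coord2[1]+i))
--       else:
--         points.append((coord1[0],coord1[1]+i))
--   elif coord1[1] == coord2[1]:
--     for i in range(abs(coord2[0]-coord1[0])+1):
--       if coord1[0] > coord2[0]:
--         points.append((coord2[0]+i,coord1[1]))
--       else:
--         points.append((coord1[0]+i,coord1[1]))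
--
--   #part 2
--   else:
--     for i in range(abs(coord2[0]-coord1[0])+1):
--       #BL to TR C1
--       if coord1[0] < coord2[0] and coord1[1] < coord2[1]:
--         points.append((coord1[0]+i,coord1[1]+i))
--       #BL to TR C2
--       elif coord2[0] < coord1[0] and coord2[1] < coord1[1]:
--         points.append((coord2[0]+i,coord2[1]+i))
--       #TL to BR c1
--       elif coord1[0] < coord2[0] and coord2[1] < coord1[1]:
--         points.append((coord1[0]+i,coord1[1]-i))
--       else: #TL to BR c2
--         points.append((coord2[0]+i,coord2[1]-i))
--   return points
-- ===== SOURCE B (Python) =====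
-- def _seg(start, step, n):
--     # divide and conquer: the n points start, start+step, ..., start+(n-1)*step
--     if n <= 1:
--         return [start]
--     half = n // 2
--     mid = (start[0] + step[0] * half, start[1] + step[1] * half)
--     return _seg(start, step, half) + _seg(mid, step, n - half)
--
-- def lineCoord(coord1, coord2):
--     (x1, y1), (x2, y2) = coord1, coord2
--     if x1 == x2:
--         return _seg((x1, min(y1, y2)), (0, 1), abs(y2 - y1) + 1)
--     if x2 < x1:
--         (x1, y1), (x2, y2) = (x2, y2), (x1, y1)
--     sy = 0 if y1 == y2 else (1 if y2 > y1 else -1)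
--     return _seg((x1, y1), (1, sy), x2 - x1 + 1)
-- ===== Notes on version B (the rewrite author's own statement) =====
-- stated objective: alternative
-- what changed: B first normalizes the segment to a start point, a unit step vector and a point count, then generates the points by divide-and-conquer recursion (split the count in half, recurse on both halves and concatenate) instead of A's single index loop with per-direction append branches.
import Mathlib
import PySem

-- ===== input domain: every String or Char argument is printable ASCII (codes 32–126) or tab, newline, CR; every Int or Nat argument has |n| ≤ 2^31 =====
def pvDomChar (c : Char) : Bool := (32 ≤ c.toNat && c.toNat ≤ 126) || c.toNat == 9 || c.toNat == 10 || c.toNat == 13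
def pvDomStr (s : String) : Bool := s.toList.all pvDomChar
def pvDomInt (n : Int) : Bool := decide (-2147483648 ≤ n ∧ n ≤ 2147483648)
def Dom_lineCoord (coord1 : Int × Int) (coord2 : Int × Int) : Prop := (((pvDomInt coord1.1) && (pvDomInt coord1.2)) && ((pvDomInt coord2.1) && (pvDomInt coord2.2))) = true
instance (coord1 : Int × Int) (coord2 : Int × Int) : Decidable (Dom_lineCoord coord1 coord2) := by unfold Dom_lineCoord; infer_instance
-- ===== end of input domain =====

-- B normalizes the segment to (start, step, count) and generates the points by divide-and-conquer
-- recursion instead of A's index loop with per-direction branches — objective: alternative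
-- decomposition; return value proved identical on all inputs (both are total).

-- ===== PORT A =====
def lineCoord (coord1 : Int × Int) (coord2 : Int × Int) : List (Int × Int) :=
  if coord1.1 = coord2.1 then
    (PySem.List.pyRange 0 (((coord2.2 - coord1.2).natAbs : Int) + 1) 1).foldl
      (fun points i =>
        if coord1.2 > coord2.2 then points ++ [(coord1.1, coord2.2 + i)]
        else points ++ [(coord1.1, coord1.2 + i)]) []
  else if coord1.2 = coord2.2 then
    (PySem.List.pyRange 0 (((coord2.1 - coord1.1).natAbs : Int) + 1) 1).foldl
      (fun points i =>
        if coord1.1 > coord2.1 then points ++ [(coord2.1 + i, coord1.2)]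
        else points ++ [(coord1.1 + i, coord1.2)]) []
  else
    (PySem.List.pyRange 0 (((coord2.1 - coord1.1).natAbs : Int) + 1) 1).foldl
      (fun points i =>
        if coord1.1 < coord2.1 ∧ coord1.2 < coord2.2 then points ++ [(coord1.1 + i, coord1.2 + i)]
        else if coord2.1 < coord1.1 ∧ coord2.2 < coord1.2 then points ++ [(coord2.1 + i, coord2.2 + i)]
        else if coord1.1 < coord2.1 ∧ coord2.2 < coord1.2 then points ++ [(coord1.1 + i, coord1.2 - i)]
        else points ++ [(coord2.1 + i, coord2.2 - i)]) []

-- ===== PORT B =====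
-- _seg's count n is always ≥ 1 in Source B (abs(..)+1 resp. x2-x1+1 with x1<x2), so carrying it as a
-- Nat (via natAbs / toNat of those nonnegative expressions) is exact; n//2 on a nonnegative int is
-- Nat division.
def segB (start : Int × Int) (step : Int × Int) (n : Nat) : List (Int × Int) :=
  if _h : n ≤ 1 then [start]
  else
    segB start step (n / 2) ++
      segB (start.1 + step.1 * (n / 2 : Nat), start.2 + step.2 * (n / 2 : Nat)) step (n - n / 2)
termination_by n
decreasing_by all_goals omega

def lineCoord_alt (coord1 : Int × Int) (coord2 : Int × Int) : List (Int × Int) :=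
  if coord1.1 = coord2.1 then
    segB (coord1.1, min coord1.2 coord2.2) (0, 1) ((coord2.2 - coord1.2).natAbs + 1)
  else
    -- the tuple swap "if x2 < x1: swap" of Source B
    let p := if coord2.1 < coord1.1 then (coord2, coord1) else (coord1, coord2)
    let sy : Int := if p.1.2 = p.2.2 then 0 else if p.2.2 > p.1.2 then 1 else -1
    segB p.1 (1, sy) ((p.2.1 - p.1.1 + 1).toNat)

-- ===== PRECONDITION & SPEC =====
def Spec_lineCoord (coord1 : Int × Int) (coord2 : Int × Int) (out : List (Int × Int)) : Prop := out = lineCoord_alt coord1 coord2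
instance (coord1 : Int × Int) (coord2 : Int × Int) (out : List (Int × Int)) : Decidable (Spec_lineCoord coord1 coord2 out) := by unfold Spec_lineCoord; infer_instance

-- ===== CLAIM (what is proved, stated in full; the proofs are below) =====
def Claim_equal_lineCoord : Prop := ∀ (coord1 : Int × Int) (coord2 : Int × Int), Dom_lineCoord coord1 coord2 → Spec_lineCoord coord1 coord2 (lineCoord coord1 coord2)

-- ===== LEMMAS AND PROOFS =====

-- segB generates the arithmetic progression of points, for any positive count
theorem segB_eq (t : Int × Int) : ∀ (n : Nat) (s : Int × Int), 1 ≤ n →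
    segB s t n = (List.range n).map (fun i : Nat => (s.1 + t.1 * i, s.2 + t.2 * i)) := by
  intro n
  induction n using Nat.strong_induction_on with
  | _ n ih =>
    intro s hn
    rw [segB]
    split_ifs with h
    · have : n = 1 := by omega
      subst this
      simp
    · have h2 : 2 ≤ n := by omega
      rw [ih (n / 2) (by omega) s (by omega), ih (n - n / 2) (by omega) _ (by omega)]
      have hsplit : n = n / 2 + (n - n / 2) := by omega
      conv_rhs => rw [hsplit, List.range_add]
      rw [List.map_append, List.map_map]
      congr 1
      apply List.map_congr_left
      intro i _
      refine Prod.ext ?_ ?_ <;> simp <;> ring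

-- A's loop over pyRange as a map over List.range
theorem map_pyRange0 (m : Int) (f : Int → Int × Int) :
    (PySem.List.pyRange 0 m 1).map f = (List.range m.toNat).map (fun k : Nat => f k) := by
  rw [PySem.List.pyRange_one, List.map_map]
  simp

-- two maps over ranges agree when the lengths agree and the functions agree below them
theorem maps_range_eq (m1 m2 : Nat) (f g : Nat → Int × Int) (hlen : m1 = m2)
    (h : ∀ k, k < m2 → f k = g k) :
    (List.range m1).map f = (List.range m2).map g := by
  subst hlen
  apply List.map_congr_left
  intro k hk
  exact h k (List.mem_range.mp hk)

-- ===== VERDICT (by name: the statement is the Claim_ definition above) =====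
theorem lineCoord_spec : Claim_equal_lineCoord := by
  intro c1 c2 _
  show lineCoord c1 c2 = lineCoord_alt c1 c2
  unfold lineCoord lineCoord_alt
  split_ifs with h1 h2 h3 h4 h3 h4 h5 h6 h5 h6 <;>
    simp only [PySem.List.foldl_append_singleton_eq_map, List.nil_append] <;>
    rw [segB_eq _ _ _ (by omega), map_pyRange0] <;>
    apply maps_range_eq <;>
    first
      | omega
      | (intro k hk
         refine Prod.ext ?_ ?_ <;> simp <;> omega)
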